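-- pv_equiv track=rewrite | github.com/wsi1212/BAEKJOON | NYPC2023/round2-b/P2.py | perform_operations
-- ===== SOURCE A (Python) =====
-- def perform_operations(arr):
--     n = len(arr)
--     result = 0
--     temp = []
--     seen_states = set()
--     while True:
--         if tuple(arr) in seen_states:
--             return -1
--         seen_states.add(tuple(arr))
--         left = []
--         right = []
--         pivot = arr[len(arr) - 1]
--         for i in arr:
--             if i > pivot:
--                 right.append(i)
--             else:
--                 left.append(i)
--         for i in left:
--             temp.append(i)
--         for i in right:
--             temp.append(i)
--         if arr == temp:
--             break
--         arr = temp
--         temp = []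
--         result += 1
--     return result
-- ===== SOURCE B (Python) =====
-- def perform_operations(arr):
--     # right-to-left scan counting strict record maxima after the last element
--     best = arr[-1]
--     count = 0
--     for x in reversed(arr):
--         if x > best:
--             count += 1
--             best = x
--     return count
-- ===== Notes on version B (the rewrite author's own statement) =====
-- stated objective: faster
-- what changed: A simulates repeated stable-partition passes around the last element (with a visited-state set) until a fixpoint; B computes the same count in one right-to-left scan counting strict record maxima beyond the last element, using the fact that each non-fixpoint pass strictly raises the last element to the next rightmost larger value (so A's -1 cycle branch is unreachable).
import Mathlib
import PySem

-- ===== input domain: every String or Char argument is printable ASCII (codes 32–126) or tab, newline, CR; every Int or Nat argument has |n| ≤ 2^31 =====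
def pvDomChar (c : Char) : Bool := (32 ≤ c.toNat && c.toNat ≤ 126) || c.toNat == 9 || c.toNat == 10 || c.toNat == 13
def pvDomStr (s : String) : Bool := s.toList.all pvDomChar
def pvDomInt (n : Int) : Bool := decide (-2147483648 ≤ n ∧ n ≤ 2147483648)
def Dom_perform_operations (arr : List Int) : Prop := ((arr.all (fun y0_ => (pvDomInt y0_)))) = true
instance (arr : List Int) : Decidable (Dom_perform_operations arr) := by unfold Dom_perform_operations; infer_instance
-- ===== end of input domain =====

-- B replaces A's repeated stable-partition simulation with a single right-to-left
-- record-maxima scan (objective: faster — one pass instead of up to n partition passes).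

-- ===== PORT A =====

-- Partition loop of A ('for i in arr: if i > pivot: right.append(i) else: left.append(i)')
def pvPartition (arr : List Int) (pivot : Int) : List Int × List Int :=
  arr.foldl (fun lr i => if pivot < i then (lr.1, lr.2 ++ [i]) else (lr.1 ++ [i], lr.2)) ([], [])

-- The 'while True' loop of A; seen is the Python set seen_states, result the counter.
-- fuel only makes the recursion structural (arr.length + 1 is proved sufficient below);
-- it encodes no algorithmic change.
def pvLoop : Nat → List Int → PySem.Set (List Int) → Int → Int
  | 0, _, _, _ => 0
  | fuel + 1, arr, seen, result =>
    if PySem.Set.contains seen arr then -1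
    else
      match PySem.List.pyGet? arr (PySem.List.len arr - 1) with
      | none => 0   -- Python raises IndexError here (arr = []); excluded by Pre_
      | some pivot =>
        -- temp = []; for i in left: temp.append(i); for i in right: temp.append(i)
        if arr = (pvPartition arr pivot).2.foldl (fun t i => t ++ [i])
            ((pvPartition arr pivot).1.foldl (fun t i => t ++ [i]) []) then result
        else pvLoop fuel ((pvPartition arr pivot).2.foldl (fun t i => t ++ [i])
            ((pvPartition arr pivot).1.foldl (fun t i => t ++ [i]) []))
          (PySem.Set.add seen arr) (result + 1)

def perform_operations (arr : List Int) : Int :=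
  let _n := PySem.List.len arr
  pvLoop (arr.length + 1) arr PySem.Set.empty 0

-- ===== PORT B =====
def perform_operations_alt (arr : List Int) : Int :=
  match PySem.List.pyGet? arr (-1) with
  | none => 0   -- Python raises IndexError here (arr = []); excluded by Pre_
  | some b =>
    ((arr.reverse).foldl (fun (s : Int × Int) x => if s.2 < x then (s.1 + 1, x) else s) (0, b)).1

-- ===== PRECONDITION & SPEC =====
-- Pre_ excludes only the empty list, on which A raises IndexError at arr[-1].
def Pre_perform_operations (arr : List Int) : Prop := arr ≠ []
instance (arr : List Int) : Decidable (Pre_perform_operations arr) := by unfold Pre_perform_operations; infer_instance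
def pvWitness_perform_operations : List Int := ([3, 1, 2])
def Spec_perform_operations (arr : List Int) (out : Int) : Prop := out = perform_operations_alt arr
instance (arr : List Int) (out : Int) : Decidable (Spec_perform_operations arr out) := by unfold Spec_perform_operations; infer_instance

-- ===== CLAIM (what is proved, stated in full; the proofs are below) =====
def Claim_equal_perform_operations : Prop := ∀ (arr : List Int), Dom_perform_operations arr → Pre_perform_operations arr → Spec_perform_operations arr (perform_operations arr)

-- ===== LEMMAS AND PROOFS =====

-- Proof-side scan: (count of strict records, final record) of a list read left-to-right.
def pvScan : List Int → Int → Nat × Int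
  | [], b => (0, b)
  | x :: xs, b => if b < x then ((pvScan xs x).1 + 1, (pvScan xs x).2) else pvScan xs b

lemma pvScan_append (xs : List Int) : ∀ (ys : List Int) (b : Int),
    pvScan (xs ++ ys) b
      = ((pvScan xs b).1 + (pvScan ys (pvScan xs b).2).1, (pvScan ys (pvScan xs b).2).2) := by
  induction xs with
  | nil => intro ys b; simp [pvScan]
  | cons x xs ih =>
    intro ys b
    by_cases h : b < x
    · simp [pvScan, h, ih]; omega
    · simp [pvScan, h, ih]

lemma pvScan_le (xs : List Int) : ∀ b : Int, b ≤ (pvScan xs b).2 := by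
  induction xs with
  | nil => intro b; simp [pvScan]
  | cons x xs ih =>
    intro b
    by_cases h : b < x
    · simpa [pvScan, h] using le_of_lt (lt_of_lt_of_le h (ih x))
    · simpa [pvScan, h] using ih b

lemma pvScan_all_le (xs : List Int) : ∀ b : Int, (∀ x ∈ xs, x ≤ b) → pvScan xs b = (0, b) := by
  induction xs with
  | nil => intro b _; simp [pvScan]
  | cons x xs ih =>
    intro b h
    have hx : ¬ b < x := not_lt.mpr (h x (by simp))
    simp only [pvScan, hx, if_false]
    exact ih b (fun y hy => h y (by simp [hy]))

lemma pvScan_filter (xs : List Int) : ∀ (p b : Int), p ≤ b →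
    pvScan xs b = pvScan (xs.filter (fun x => decide (p < x))) b := by
  induction xs with
  | nil => intro p b _; simp
  | cons x xs ih =>
    intro p b hpb
    by_cases h : b < x
    · have hpx : p < x := lt_of_le_of_lt hpb h
      simp [pvScan, h, hpx, ← ih p x (le_of_lt hpx)]
    · by_cases hpx : p < x
      · simp [pvScan, h, hpx, ← ih p b hpb]
      · simp [pvScan, h, hpx, ← ih p b hpb]

lemma pvScan_count_le (xs : List Int) : ∀ b : Int, (pvScan xs b).1 ≤ xs.length := by
  induction xs with
  | nil => intro b; simp [pvScan]
  | cons x xs ih =>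
    intro b
    by_cases h : b < x
    · simpa [pvScan, h] using ih x
    · simp only [pvScan, h, if_false, List.length_cons]
      exact le_trans (ih b) (Nat.le_succ _)

lemma pv_getLastD_append (l r : List Int) (h : r ≠ []) :
    (l ++ r).getLastD 0 = r.getLastD 0 := by
  rcases List.eq_nil_or_concat r with rfl | ⟨L, b, rfl⟩
  · exact absurd rfl h
  · simp [List.concat_eq_append, List.getLastD_eq_getLast?]

-- The step lemma: one partition pass of A, applied to a nonempty arr whose '> pivot'
-- part is nonempty, decreases the record count by exactly one and strictly increases
-- the last element.
lemma pvStep (arr : List Int) (h : arr ≠ [])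
    (hr : arr.filter (fun i => decide (arr.getLastD 0 < i)) ≠ []) :
    (arr.filter (fun i => !decide (arr.getLastD 0 < i))
        ++ arr.filter (fun i => decide (arr.getLastD 0 < i)) ≠ []) ∧
    arr.getLastD 0 <
      ((arr.filter (fun i => !decide (arr.getLastD 0 < i))
        ++ arr.filter (fun i => decide (arr.getLastD 0 < i))).getLastD 0) ∧
    (pvScan ((arr.filter (fun i => !decide (arr.getLastD 0 < i))
        ++ arr.filter (fun i => decide (arr.getLastD 0 < i))).reverse)
       ((arr.filter (fun i => !decide (arr.getLastD 0 < i))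
        ++ arr.filter (fun i => decide (arr.getLastD 0 < i))).getLastD 0)).1 + 1
      = (pvScan arr.reverse (arr.getLastD 0)).1 := by
  obtain ⟨u, p, rfl⟩ : ∃ u p, arr = u ++ [p] := by
    rcases List.eq_nil_or_concat arr with rfl | ⟨L, b, hL⟩
    · exact absurd rfl h
    · exact ⟨L, b, by simpa [List.concat_eq_append] using hL⟩
  have hp : (u ++ [p]).getLastD 0 = p := by simp [List.getLastD_eq_getLast?]
  rw [hp] at hr ⊢
  have hfilter_arr : (u ++ [p]).filter (fun i => decide (p < i))
      = u.filter (fun i => decide (p < i)) := by simp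
  have hleft : (u ++ [p]).filter (fun i => !decide (p < i))
      = u.filter (fun i => !decide (p < i)) ++ [p] := by simp
  set right := u.filter (fun i => decide (p < i)) with hright
  have hrne : right ≠ [] := by rwa [hfilter_arr] at hr
  obtain ⟨r', q0, hr0⟩ : ∃ r' q0, right = r' ++ [q0] := by
    rcases List.eq_nil_or_concat right with h' | ⟨L, b, hL⟩
    · exact absurd h' hrne
    · exact ⟨L, b, by simpa [List.concat_eq_append] using hL⟩
  have hq0 : p < q0 := by
    have hmem : q0 ∈ right := by rw [hr0]; simp
    have := List.of_mem_filter hmem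
    simpa using this
  constructor
  · rw [hfilter_arr]; simp
  have hlast : ((u ++ [p]).filter (fun i => !decide (p < i))
      ++ (u ++ [p]).filter (fun i => decide (p < i))).getLastD 0 = q0 := by
    rw [hfilter_arr, pv_getLastD_append _ _ hrne, hr0]
    simp [List.getLastD_eq_getLast?]
  refine ⟨by rw [hlast]; exact hq0, ?_⟩
  rw [hlast, hfilter_arr, hleft]
  have hRHS : (pvScan ((u ++ [p]).reverse) p).1 = (pvScan r'.reverse q0).1 + 1 := by
    have h1 : (u ++ [p]).reverse = p :: u.reverse := by simp
    rw [h1]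
    simp only [pvScan, lt_irrefl, if_false]
    rw [pvScan_filter u.reverse p p le_rfl]
    have hfr : List.filter (fun x => decide (p < x)) u.reverse = right.reverse := by
      rw [hright]; simp [List.filter_reverse]
    rw [hfr, hr0]
    simp [pvScan, hq0]
  rw [hRHS]
  have h2 : ((u.filter (fun i => !decide (p < i)) ++ [p]) ++ right).reverse
      = q0 :: (r'.reverse ++ (u.filter (fun i => !decide (p < i)) ++ [p]).reverse) := by
    rw [hr0]; simp
  rw [h2]
  simp only [pvScan, lt_irrefl, if_false]
  rw [pvScan_append]
  have hall : ∀ x ∈ (u.filter (fun i => !decide (p < i)) ++ [p]).reverse,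
      x ≤ (pvScan r'.reverse q0).2 := by
    intro x hx
    have hxp : x ≤ p := by
      rcases List.mem_append.mp (List.mem_reverse.mp hx) with hx' | hx'
      · have := List.of_mem_filter hx'
        simpa using this
      · simp at hx'; omega
    calc x ≤ p := hxp
    _ ≤ q0 := le_of_lt hq0
    _ ≤ (pvScan r'.reverse q0).2 := pvScan_le _ _
  rw [pvScan_all_le _ _ hall]
  simp

lemma pvPartition_eq (arr : List Int) (pivot : Int) : ∀ l r : List Int,
    arr.foldl (fun lr i => if pivot < i then (lr.1, lr.2 ++ [i]) else (lr.1 ++ [i], lr.2)) (l, r)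
      = (l ++ arr.filter (fun i => !decide (pivot < i)),
         r ++ arr.filter (fun i => decide (pivot < i))) := by
  induction arr with
  | nil => intro l r; simp
  | cons x xs ih =>
    intro l r
    by_cases h : pivot < x <;> simp [h, ih]

-- 'temp = []; for i in left: temp.append(i); for i in right: temp.append(i)' as filters
lemma pv_temp_eq (arr : List Int) (pivot : Int) :
    (pvPartition arr pivot).2.foldl (fun t i => t ++ [i])
        ((pvPartition arr pivot).1.foldl (fun t i => t ++ [i]) [])
      = arr.filter (fun i => !decide (pivot < i)) ++ arr.filter (fun i => decide (pivot < i)) := by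
  unfold pvPartition
  rw [pvPartition_eq]
  simp only [List.nil_append]
  rw [PySem.List.foldl_append_singleton_eq_self, PySem.List.foldl_append_singleton_eq_self]
  simp

-- arr[len(arr) - 1] on a nonempty list is its last element
lemma pv_pyGet_last_some (arr : List Int) (h : arr ≠ []) :
    PySem.List.pyGet? arr (PySem.List.len arr - 1) = some (arr.getLastD 0) := by
  cases arr with
  | nil => exact absurd rfl h
  | cons x xs =>
    have hcast : PySem.List.len (x :: xs) - 1 = (((x :: xs).length - 1 : Nat) : Int) := by
      simp [PySem.List.len_eq]
    rw [hcast, PySem.List.pyGet?_natCast, List.getElem?_eq_getElem (by simp),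
      List.getLastD_eq_getLast?, List.getLast?_eq_some_getLast (by simp), Option.getD_some,
      List.getLast_eq_getElem]
    rfl

lemma pv_pyGet_last {arr : List Int} {pivot : Int}
    (h : PySem.List.pyGet? arr (PySem.List.len arr - 1) = some pivot) :
    arr ≠ [] ∧ pivot = arr.getLastD 0 := by
  have hne : arr ≠ [] := by
    rintro rfl
    have : PySem.List.pyGet? ([] : List Int) (PySem.List.len ([] : List Int) - 1) = none := by decide
    rw [this] at h; cases h
  rw [pv_pyGet_last_some arr hne] at h
  exact ⟨hne, (Option.some.inj h).symm⟩

-- '> pivot' part nonempty whenever the partition pass changes the list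
lemma pv_right_ne (arr : List Int) (p : Int)
    (harr : arr ≠ arr.filter (fun i => !decide (p < i)) ++ arr.filter (fun i => decide (p < i))) :
    arr.filter (fun i => decide (p < i)) ≠ [] := by
  intro hempty
  apply harr
  rw [hempty, List.append_nil]
  have hall : ∀ a ∈ arr, (!decide (p < a)) = true := by
    intro a ha
    by_contra hcon
    have hlt : p < a := by
      simp only [Bool.not_eq_true', decide_eq_false_iff_not, not_not] at hcon
      exact hcon
    have hmem2 : a ∈ arr.filter (fun i => decide (p < i)) :=
      List.mem_filter.mpr ⟨ha, by simp only [decide_eq_true_eq]; exact hlt⟩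
    rw [hempty] at hmem2
    simp at hmem2
  exact (List.filter_eq_self.mpr hall).symm

-- B's loop over reversed(arr) computes pvScan.
lemma pv_foldlB_eq (xs : List Int) : ∀ (c b : Int),
    xs.foldl (fun (s : Int × Int) x => if s.2 < x then (s.1 + 1, x) else s) (c, b)
      = (c + ((pvScan xs b).1 : Int), (pvScan xs b).2) := by
  induction xs with
  | nil => intro c b; simp [pvScan]
  | cons x xs ih =>
    intro c b
    by_cases h : b < x
    · simp [pvScan, h, ih]; ring
    · simp [pvScan, h, ih]

-- Main loop invariant: with enough fuel, while every state in seen has a strictly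
-- smaller last element than arr, pvLoop returns result + (record count of arr).
lemma pvLoop_eq : ∀ (fuel : Nat) (arr : List Int) (seen : PySem.Set (List Int)) (result : Int),
    arr ≠ [] →
    (pvScan arr.reverse (arr.getLastD 0)).1 < fuel →
    (∀ s ∈ seen, s.getLastD 0 < arr.getLastD 0) →
    pvLoop fuel arr seen result = result + ((pvScan arr.reverse (arr.getLastD 0)).1 : Int) := by
  intro fuel
  induction fuel with
  | zero => intro arr seen result _ hfuel _; omega
  | succ fuel ih =>
    intro arr seen result hne hfuel hinv
    have hns : ¬ PySem.Set.contains seen arr = true := by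
      intro hc
      have hmem : arr ∈ seen := by simpa [PySem.Set.contains] using hc
      exact absurd (hinv arr hmem) (lt_irrefl _)
    rw [pvLoop, if_neg hns]
    split
    · rename_i hp
      rw [pv_pyGet_last_some arr hne] at hp
      cases hp
    · rename_i pivot hp
      obtain ⟨-, hpiv⟩ := pv_pyGet_last hp
      split
      · rename_i harr
        rw [pv_temp_eq arr pivot, hpiv] at harr
        by_cases hre : arr.filter (fun i => decide (arr.getLastD 0 < i)) = []
        · have hall : ∀ x ∈ arr.reverse, x ≤ arr.getLastD 0 := by
            intro x hx
            have hxle : ¬ arr.getLastD 0 < x := by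
              simpa using List.filter_eq_nil_iff.mp hre x (List.mem_reverse.mp hx)
            exact not_lt.mp hxle
          rw [pvScan_all_le _ _ hall]
          simp
        · obtain ⟨-, h2, -⟩ := pvStep arr hne hre
          rw [← harr] at h2
          exact absurd h2 (lt_irrefl _)
      · rename_i harr
        rw [pv_temp_eq arr pivot, hpiv] at harr ⊢
        have hr := pv_right_ne arr (arr.getLastD 0) harr
        obtain ⟨h1, h2, h3⟩ := pvStep arr hne hr
        rw [ih _ (PySem.Set.add seen arr) (result + 1) h1 (by omega) ?_]
        · omega
        · intro s hs
          rcases (by simpa [PySem.Set.mem_add] using hs : s ∈ seen ∨ s = arr) with hs' | rfl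
          · exact lt_trans (hinv s hs') h2
          · exact h2

-- ===== VERDICT (by name: the statement is the Claim_ definition above) =====
theorem perform_operations_spec : Claim_equal_perform_operations := by
  intro arr _hdom hpre
  unfold Spec_perform_operations
  show pvLoop (arr.length + 1) arr PySem.Set.empty 0 = perform_operations_alt arr
  rw [pvLoop_eq (arr.length + 1) arr PySem.Set.empty 0 hpre
    (by have h := pvScan_count_le arr.reverse (arr.getLastD 0); rw [List.length_reverse] at h; omega)
    (by intro s hs; simp [PySem.Set.empty] at hs)]
  unfold perform_operations_alt
  rw [PySem.List.pyGet?_neg_one, List.getLast?_eq_some_getLast hpre]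
  have hb : arr.getLast hpre = arr.getLastD 0 := by
    rw [List.getLastD_eq_getLast?, List.getLast?_eq_some_getLast hpre]; rfl
  simp only [hb]
  rw [pv_foldlB_eq]
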